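-- pv_equiv track=rewrite | github.com/developer-hla/elca-bulletin-maker | src/bulletin_maker/ui/api.py | _filter_verses
-- ===== SOURCE A (Python) =====
-- def _format_verse_label(selected: list[int]) -> str:
--     """Build a compact verse label like 'Verses 1, 3-5' from sorted indices."""
--     if not selected:
--         return ""
--     nums = sorted(selected)
--     ranges: list[str] = []
--     start = end = nums[0]
--     for n in nums[1:]:
--         if n == end + 1:
--             end = n
--         else:
--             ranges.append(str(start) if start == end else f"{start}-{end}")
--             start = end = n
--     ranges.append(str(start) if start == end else f"{start}-{end}")
--     label = ", ".join(ranges)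
--     return f"Verse {label}" if len(nums) == 1 else f"Verses {label}"
--
-- def _filter_verses(
--     all_verses: list[str],
--     selected: list[int] | None,
-- ) -> tuple[list[str], str]:
--     """Filter verses by 1-based indices and build a verse label.
--
--     Returns (filtered_verses, verse_label).  If *selected* is None or
--     includes all verses, returns the original list with an empty label.
--     """
--     total = len(all_verses)
--     if not selected or len(selected) >= total:
--         return all_verses, ""
--     valid = sorted(i for i in selected if 1 <= i <= total)
--     if not valid or len(valid) >= total:
--         return all_verses, ""
--     filtered = [all_verses[i - 1] for i in valid]
--     return filtered, _format_verse_label(valid)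
-- ===== SOURCE B (Python) =====
-- def _filter_verses(all_verses, selected):
--     total = len(all_verses)
--     if not selected or len(selected) >= total:
--         return all_verses, ""
--     valid = sorted(i for i in selected if 1 <= i <= total)
--     if not valid or len(valid) >= total:
--         return all_verses, ""
--     filtered = [all_verses[i - 1] for i in valid]
--     # Staged label build: gap positions -> cut points -> format each segment by its endpoints.
--     gaps = [k + 1 for k, (a, b) in enumerate(zip(valid, valid[1:])) if b != a + 1]
--     cuts = [0] + gaps + [len(valid)]
--     parts = [
--         str(valid[lo]) if hi - lo == 1 else f"{valid[lo]}-{valid[hi - 1]}"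
--         for lo, hi in zip(cuts, cuts[1:])
--     ]
--     prefix = "Verse" if len(valid) == 1 else "Verses"
--     return filtered, f"{prefix} {', '.join(parts)}"
-- ===== Notes on version B (the rewrite author's own statement) =====
-- stated objective: alternative
-- what changed: The range label is built in explicit stages — compute all gap positions globally by zipping the sorted indices with their own tail, turn them into cut points, then format each cut segment by its endpoints — instead of A's single sweep with start/end accumulator variables flushing strings as it goes; the redundant re-sort inside A's label builder is also gone.
import Mathlib
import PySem

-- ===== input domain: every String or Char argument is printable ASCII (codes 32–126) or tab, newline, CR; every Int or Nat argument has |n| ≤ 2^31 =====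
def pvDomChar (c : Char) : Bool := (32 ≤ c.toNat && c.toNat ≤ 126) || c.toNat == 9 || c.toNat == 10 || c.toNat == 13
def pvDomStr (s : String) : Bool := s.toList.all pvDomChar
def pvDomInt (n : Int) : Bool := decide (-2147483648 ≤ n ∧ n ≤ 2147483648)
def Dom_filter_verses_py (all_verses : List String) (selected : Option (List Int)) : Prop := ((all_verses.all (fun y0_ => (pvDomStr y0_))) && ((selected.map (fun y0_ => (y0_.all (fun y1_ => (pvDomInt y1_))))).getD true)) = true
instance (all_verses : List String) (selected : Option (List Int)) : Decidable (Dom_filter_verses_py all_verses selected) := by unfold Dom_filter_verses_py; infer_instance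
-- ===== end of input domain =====

-- B builds the range label in explicit stages (global gap positions -> cut points ->
-- per-segment formatting) instead of A's single start/end-accumulator sweep; equal return values proved.

-- ===== PORT A =====
-- 'str(start) if start == end else f"{start}-{end}"' (appears twice in A)
def pvFmt (s e : Int) : String :=
  if s == e then PySem.Int.toStr s else PySem.Int.toStr s ++ "-" ++ PySem.Int.toStr e

-- the body of A's for-loop over nums[1:]; state = (ranges, start, end)
def pvStepA (st : List String × Int × Int) (n : Int) : List String × Int × Int :=
  if n == st.2.2 + 1 then (st.1, st.2.1, n)
  else (st.1 ++ [pvFmt st.2.1 st.2.2], n, n)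

-- _format_verse_label
def pvFormatVerseLabel (selected : List Int) : String :=
  if selected.isEmpty then ""
  else
    match PySem.List.sorted selected (fun x => x) false with
    | [] => ""  -- unreachable: sorted of a nonempty list is nonempty
    | n0 :: rest =>
      let st := rest.foldl pvStepA ([], n0, n0)
      let ranges := st.1 ++ [pvFmt st.2.1 st.2.2]
      let label := PySem.Str.join ", " ranges
      -- len(nums) == 1 ↔ rest = []
      if rest.isEmpty then "Verse " ++ label else "Verses " ++ label

def filter_verses_py (all_verses : List String) (selected : Option (List Int)) : List String × String :=
  let total : Int := all_verses.length
  let sel := selected.getD []   -- 'not selected' is true for both None and []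
  if sel.isEmpty || decide (total ≤ (sel.length : Int)) then (all_verses, "")
  else
    let valid := PySem.List.sorted (sel.filter (fun i => decide (1 ≤ i) && decide (i ≤ total))) (fun x => x) false
    if valid.isEmpty || decide (total ≤ (valid.length : Int)) then (all_verses, "")
    else
      -- every i in valid satisfies 1 ≤ i ≤ total, so all_verses[i-1] never raises
      let filtered := valid.map (fun i => (PySem.List.pyGet? all_verses (i - 1)).getD "")
      (filtered, pvFormatVerseLabel valid)

-- ===== PORT B =====
-- gaps = [k + 1 for k, (a, b) in enumerate(zip(valid, valid[1:])) if b != a + 1]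
def pvGaps (v : List Int) : List Int :=
  (PySem.List.enumerate (v.zip (PySem.List.slice v (some 1) none)) 0).filterMap
    (fun kp => if kp.2.2 == kp.2.1 + 1 then none else some (kp.1 + 1))

-- cuts = [0] + gaps + [len(valid)]
def pvCuts (v : List Int) : List Int := 0 :: pvGaps v ++ [(v.length : Int)]

-- the comprehension's expression: str(valid[lo]) if hi - lo == 1 else f"{valid[lo]}-{valid[hi-1]}"
-- (cut points are always in range, so valid[..] never raises; pyGetD is exact there)
def pvSegFmt (v : List Int) (p : Int × Int) : String :=
  if p.2 - p.1 == 1 then PySem.Int.toStr (PySem.List.pyGetD v p.1 0)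
  else PySem.Int.toStr (PySem.List.pyGetD v p.1 0) ++ "-" ++ PySem.Int.toStr (PySem.List.pyGetD v (p.2 - 1) 0)

-- parts = [ ... for lo, hi in zip(cuts, cuts[1:])]
def pvParts (v : List Int) : List String :=
  ((pvCuts v).zip (PySem.List.slice (pvCuts v) (some 1) none)).map (pvSegFmt v)

def filter_verses_py_alt (all_verses : List String) (selected : Option (List Int)) : List String × String :=
  let total : Int := all_verses.length
  let sel := selected.getD []
  if sel.isEmpty || decide (total ≤ (sel.length : Int)) then (all_verses, "")
  else
    let valid := PySem.List.sorted (sel.filter (fun i => decide (1 ≤ i) && decide (i ≤ total))) (fun x => x) false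
    if valid.isEmpty || decide (total ≤ (valid.length : Int)) then (all_verses, "")
    else
      let filtered := valid.map (fun i => (PySem.List.pyGet? all_verses (i - 1)).getD "")
      let parts := pvParts valid
      let prefixStr := if valid.length == 1 then "Verse" else "Verses"
      (filtered, prefixStr ++ " " ++ PySem.Str.join ", " parts)

-- ===== PRECONDITION & SPEC =====
def Spec_filter_verses_py (all_verses : List String) (selected : Option (List Int)) (out : List String × String) : Prop := out = filter_verses_py_alt all_verses selected
instance (all_verses : List String) (selected : Option (List Int)) (out : List String × String) : Decidable (Spec_filter_verses_py all_verses selected out) := by unfold Spec_filter_verses_py; infer_instance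

-- ===== CLAIM (what is proved, stated in full; the proofs are below) =====
def Claim_equal_filter_verses_py : Prop := ∀ (all_verses : List String) (selected : Option (List Int)), Dom_filter_verses_py all_verses selected → Spec_filter_verses_py all_verses selected (filter_verses_py all_verses selected)

-- ===== LEMMAS AND PROOFS =====

-- canonical per-run description of the label pieces; both ports' builders are proved equal to it
def pvSpecParts : Int → Int → List Int → List String
  | s, e, [] => [pvFmt s e]
  | s, e, n :: t => if n = e + 1 then pvSpecParts s n t else pvFmt s e :: pvSpecParts n n t

-- A's sweep produces exactly pvSpecParts
theorem pv_foldA (t : List Int) : ∀ (R : List String) (s e : Int),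
    ((t.foldl pvStepA (R, s, e)).1 ++
      [pvFmt (t.foldl pvStepA (R, s, e)).2.1 (t.foldl pvStepA (R, s, e)).2.2]) =
    R ++ pvSpecParts s e t := by
  induction t with
  | nil => intro R s e; simp [pvSpecParts]
  | cons n t ih =>
    intro R s e
    by_cases h : n = e + 1
    · simpa [pvStepA, pvSpecParts, h] using ih R s n
    · simpa [pvStepA, pvSpecParts, h, List.append_assoc] using ih (R ++ [pvFmt s e]) n n

-- enumerate from s+1 is enumerate from s with indices shifted by 1
theorem pv_enum_succ {α : Type} (ps : List α) : ∀ (s : Int),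
    PySem.List.enumerate ps (s + 1) = (PySem.List.enumerate ps s).map (fun p => (p.1 + 1, p.2)) := by
  induction ps with
  | nil => intro s; simp [PySem.List.enumerate_nil]
  | cons x ps ih =>
    intro s
    rw [PySem.List.enumerate_cons, PySem.List.enumerate_cons, ih (s + 1)]
    simp

-- the gap-collecting filterMap on shifted indices
theorem pv_filterMap_shift (l : List (Int × (Int × Int))) :
    (l.filterMap (fun kp => if kp.2.2 == kp.2.1 + 1 then none else some (kp.1 + 1 + 1))) =
      (l.filterMap (fun kp => if kp.2.2 == kp.2.1 + 1 then none else some (kp.1 + 1))).map (· + 1) := by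
  induction l with
  | nil => simp
  | cons p l ih =>
    simp only [List.filterMap_cons]
    by_cases hk : (p.2.2 == p.2.1 + 1) = true
    · rw [if_pos hk, if_pos hk, ih]
    · rw [if_neg hk, if_neg hk, ih, List.map_cons]

-- structural recursion of the gap positions
theorem pv_gaps_singleton (e : Int) : pvGaps [e] = [] := by
  simp [pvGaps, PySem.List.slice_from_one, PySem.List.enumerate_nil]

theorem pv_gaps_cons (e x : Int) (t : List Int) :
    pvGaps (e :: x :: t) =
      (if x = e + 1 then [] else [1]) ++ (pvGaps (x :: t)).map (· + 1) := by
  unfold pvGaps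
  rw [PySem.List.slice_from_one, PySem.List.slice_from_one]
  simp only [List.tail_cons]
  show (PySem.List.enumerate ((e, x) :: (x :: t).zip t) 0).filterMap _ = _
  rw [PySem.List.enumerate_cons, show (0 : Int) + 1 = 0 + 1 from rfl, pv_enum_succ ((x :: t).zip t) 0,
      List.filterMap_cons, List.filterMap_map]
  have hfun : ((fun kp => if kp.2.2 == kp.2.1 + 1 then none else some (kp.1 + 1)) ∘
        (fun (p : Int × Int × Int) => (p.1 + 1, p.2))) =
      (fun (kp : Int × Int × Int) => if kp.2.2 == kp.2.1 + 1 then none else some (kp.1 + 1 + 1)) := by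
    funext kp; rfl
  rw [hfun, pv_filterMap_shift]
  by_cases h : x = e + 1 <;> simp [h]

theorem pv_gaps_pos (v : List Int) : ∀ g ∈ pvGaps v, 1 ≤ g := by
  match v with
  | [] => simp [pvGaps, PySem.List.slice_from_one, PySem.List.enumerate_nil]
  | [e] => simp [pv_gaps_singleton]
  | e :: x :: t =>
    intro g hg
    rw [pv_gaps_cons] at hg
    rcases List.mem_append.1 hg with h | h
    · split at h <;> simp_all
    · rcases List.mem_map.1 h with ⟨g', hg', rfl⟩
      have := pv_gaps_pos (x :: t) g' hg'
      omega

-- the cut points after the leading 0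
def pvTC (v : List Int) : List Int := pvGaps v ++ [(v.length : Int)]

theorem pv_cuts_eq (v : List Int) : pvCuts v = 0 :: pvTC v := rfl

theorem pv_tc_singleton (e : Int) : pvTC [e] = [1] := by
  simp [pvTC, pv_gaps_singleton]

theorem pv_tc_gap (e x : Int) (t : List Int) (h : ¬ x = e + 1) :
    pvTC (e :: x :: t) = 1 :: (pvTC (x :: t)).map (· + 1) := by
  unfold pvTC
  rw [pv_gaps_cons]
  simp [h, List.length_cons]

theorem pv_tc_nogap (e x : Int) (t : List Int) (h : x = e + 1) :
    pvTC (e :: x :: t) = (pvTC (x :: t)).map (· + 1) := by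
  unfold pvTC
  rw [pv_gaps_cons]
  simp [h, List.length_cons]

theorem pv_tc_ne_nil (v : List Int) : pvTC v ≠ [] := by
  simp [pvTC]

theorem pv_tc_pos (v : List Int) (hv : v ≠ []) : ∀ c ∈ pvTC v, 1 ≤ c := by
  intro c hc
  rcases List.mem_append.1 hc with h | h
  · exact pv_gaps_pos v c h
  · simp only [List.mem_singleton] at h
    subst h
    cases v with
    | nil => exact absurd rfl hv
    | cons a t => simp only [List.length_cons]; omega

-- walk the cut points, formatting the segment between each adjacent pair
def pvSegs (v : List Int) (lo : Int) : List Int → List String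
  | [] => []
  | c :: cs => pvSegFmt v (lo, c) :: pvSegs v c cs

theorem pv_pairs_cons_cons (a b : Int) (l : List Int) (f : Int × Int → String) :
    ((a :: b :: l).zip (b :: l)).map f = f (a, b) :: ((b :: l).zip l).map f := rfl

-- pvParts is the segment walk over 0 :: pvTC
theorem pv_zip_segs (v : List Int) : ∀ (tc : List Int) (lo : Int),
    ((lo :: tc).zip tc).map (pvSegFmt v) = pvSegs v lo tc := by
  intro tc
  induction tc with
  | nil => intro lo; rfl
  | cons c cs ih => intro lo; rw [pv_pairs_cons_cons, ih c]; rfl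

theorem pv_parts_eq_segs (v : List Int) : pvParts v = pvSegs v 0 (pvTC v) := by
  unfold pvParts
  rw [PySem.List.slice_from_one, pv_cuts_eq]
  exact pv_zip_segs v (pvTC v) 0

-- lookups shift under cons for nonnegative indices
theorem pv_getD_cons_succ (a : Int) (t : List Int) (j : Int) (hj : 0 ≤ j) :
    PySem.List.pyGetD (a :: t) (j + 1) 0 = PySem.List.pyGetD t j 0 := by
  obtain ⟨n, rfl⟩ := Int.eq_ofNat_of_zero_le hj
  rw [show ((n : Int) + 1) = ((n + 1 : Nat) : Int) by push_cast; ring,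
      PySem.List.pyGetD_natCast, PySem.List.pyGetD_natCast]
  simp [List.getD]

theorem pv_getD_cons_zero (a : Int) (t : List Int) :
    PySem.List.pyGetD (a :: t) 0 0 = a := by
  rw [show (0 : Int) = ((0 : Nat) : Int) from rfl, PySem.List.pyGetD_natCast]
  simp [List.getD]

theorem pv_segFmt_shift (a : Int) (t : List Int) (p : Int × Int)
    (h1 : 0 ≤ p.1) (h2 : 1 ≤ p.2) :
    pvSegFmt (a :: t) (p.1 + 1, p.2 + 1) = pvSegFmt t p := by
  unfold pvSegFmt
  have hx : (p.2 + 1) - (p.1 + 1) = p.2 - p.1 := by ring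
  have hy : p.2 + 1 - 1 = (p.2 - 1) + 1 := by ring
  simp only [hx, hy]
  rw [pv_getD_cons_succ a t p.1 h1, pv_getD_cons_succ a t (p.2 - 1) (by omega)]

-- the segment walk shifts under cons
theorem pv_segs_shift (a : Int) (w : List Int) : ∀ (tc : List Int) (lo : Int), 0 ≤ lo →
    (∀ c ∈ tc, 1 ≤ c) →
    pvSegs (a :: w) (lo + 1) (tc.map (· + 1)) = pvSegs w lo tc := by
  intro tc
  induction tc with
  | nil => intro lo _ _; rfl
  | cons c cs ih =>
    intro lo hlo hall
    have hc : 1 ≤ c := hall c (List.mem_cons_self ..)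
    simp only [List.map_cons, pvSegs]
    rw [show pvSegFmt (a :: w) (lo + 1, c + 1) = pvSegFmt (a :: w) ((lo, c).1 + 1, (lo, c).2 + 1) from rfl,
        pv_segFmt_shift a w (lo, c) hlo hc,
        ih c (by omega) (fun c' hc' => hall c' (List.mem_cons_of_mem c hc'))]

-- specialization of pv_segs_shift at lo = 0
theorem pv_segs_shift_zero (a : Int) (w : List Int) (tc : List Int) (hall : ∀ c ∈ tc, 1 ≤ c) :
    pvSegs (a :: w) 1 (tc.map (· + 1)) = pvSegs w 0 tc := by
  simpa using pv_segs_shift a w tc 0 (le_refl 0) hall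

-- pvParts with the FIRST segment forced to start at s (proof-side generalization)
def pvPipeF (s : Int) (v : List Int) : List String :=
  match pvTC v with
  | [] => []
  | c :: cs => pvFmt s (PySem.List.pyGetD v (c - 1) 0) :: pvSegs v c cs

-- R2: peeling a gap
theorem pv_pipeF_gap (s e x : Int) (t : List Int) (h : ¬ x = e + 1) :
    pvPipeF s (e :: x :: t) = pvFmt s e :: pvParts (x :: t) := by
  unfold pvPipeF
  rw [pv_tc_gap e x t h]
  simp only
  rw [show (1 : Int) - 1 = 0 by ring, pv_getD_cons_zero,
      pv_segs_shift_zero e (x :: t) (pvTC (x :: t)) (pv_tc_pos (x :: t) (by simp)),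
      pv_parts_eq_segs]

-- R1: absorbing a consecutive element
theorem pv_pipeF_nogap (s e x : Int) (t : List Int) (h : x = e + 1) :
    pvPipeF s (e :: x :: t) = pvPipeF s (x :: t) := by
  unfold pvPipeF
  rw [pv_tc_nogap e x t h]
  cases htc : pvTC (x :: t) with
  | nil => exact absurd htc (pv_tc_ne_nil (x :: t))
  | cons c cs =>
    have hc : 1 ≤ c := pv_tc_pos (x :: t) (by simp) c (by rw [htc]; exact List.mem_cons_self ..)
    have hcs : ∀ c' ∈ cs, 1 ≤ c' := fun c' hc' =>
      pv_tc_pos (x :: t) (by simp) c' (by rw [htc]; exact List.mem_cons_of_mem c hc')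
    simp only [List.map_cons]
    rw [show (c : Int) + 1 - 1 = (c - 1) + 1 by ring,
        pv_getD_cons_succ e (x :: t) (c - 1) (by omega)]
    congr 1
    exact pv_segs_shift e (x :: t) cs c (by omega) hcs

-- first-run consecutiveness: the element just before the first cut is e + (h - 1)
theorem pv_consec (t : List Int) : ∀ (e : Int),
    1 ≤ (pvTC (e :: t)).headI ∧
      PySem.List.pyGetD (e :: t) ((pvTC (e :: t)).headI - 1) 0 = e + ((pvTC (e :: t)).headI - 1) := by
  induction t with
  | nil =>
    intro e
    rw [pv_tc_singleton]
    simp only [List.headI]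
    constructor
    · exact le_refl 1
    · rw [show (1 : Int) - 1 = 0 by ring, pv_getD_cons_zero]; ring
  | cons x t' ih =>
    intro e
    by_cases h : x = e + 1
    · rw [pv_tc_nogap e x t' h]
      cases htc : pvTC (x :: t') with
      | nil => exact absurd htc (pv_tc_ne_nil (x :: t'))
      | cons c cs =>
        have := ih x
        rw [htc] at this
        simp only [List.headI] at this ⊢
        simp only [List.map_cons]
        obtain ⟨hc, hget⟩ := this
        constructor
        · omega
        · rw [show (c : Int) + 1 - 1 = (c - 1) + 1 by ring,
              pv_getD_cons_succ e (x :: t') (c - 1) (by omega), hget]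
          rw [h]; ring
    · rw [pv_tc_gap e x t' h]
      simp only [List.headI]
      constructor
      · exact le_refl 1
      · rw [show (1 : Int) - 1 = 0 by ring, pv_getD_cons_zero]; ring

-- R3: the real pvParts is pvPipeF started at the head element
theorem pv_parts_pipeF (e : Int) (t : List Int) :
    pvParts (e :: t) = pvPipeF e (e :: t) := by
  rw [pv_parts_eq_segs]
  unfold pvPipeF
  cases htc : pvTC (e :: t) with
  | nil => exact absurd htc (pv_tc_ne_nil (e :: t))
  | cons c cs =>
    obtain ⟨hc, hget⟩ := pv_consec t e
    rw [htc] at hc hget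
    simp only [List.headI] at hc hget
    simp only [pvSegs]
    congr 1
    unfold pvSegFmt pvFmt
    simp only [pv_getD_cons_zero, hget]
    by_cases h1 : c = 1
    · subst h1
      norm_num
    · have : (c - 0 == 1) = false := by simp; omega
      rw [this]
      simp only [Bool.false_eq_true, if_false]
      have : (e == e + (c - 1)) = false := by simp; omega
      rw [this]
      simp

-- main induction: pvPipeF computes pvSpecParts
theorem pv_pipeF_spec (t : List Int) : ∀ (s e : Int),
    pvPipeF s (e :: t) = pvSpecParts s e t := by
  induction t with
  | nil =>
    intro s e
    unfold pvPipeF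
    rw [pv_tc_singleton]
    simp only [pvSpecParts]
    rw [show (1 : Int) - 1 = 0 by ring, pv_getD_cons_zero]
    rfl
  | cons x t' ih =>
    intro s e
    by_cases h : x = e + 1
    · rw [pv_pipeF_nogap s e x t' h, ih s x]
      simp [pvSpecParts, h]
    · rw [pv_pipeF_gap s e x t' h, pv_parts_pipeF x t', ih x x]
      simp [pvSpecParts, h]

-- the two label builders agree on a sorted nonempty list
theorem pv_label_eq (valid : List Int) (hs : PySem.List.sorted valid (fun x => x) false = valid)
    (hne : valid ≠ []) :
    pvFormatVerseLabel valid =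
      (if valid.length == 1 then "Verse" else "Verses") ++ " " ++
        PySem.Str.join ", " (pvParts valid) := by
  cases valid with
  | nil => exact absurd rfl hne
  | cons n0 rest =>
    unfold pvFormatVerseLabel
    rw [hs]
    simp only [List.isEmpty_cons, Bool.false_eq_true, if_false]
    rw [pv_foldA rest [] n0 n0, List.nil_append, pv_parts_pipeF n0 rest, pv_pipeF_spec rest n0 n0]
    cases rest with
    | nil => simp
    | cons m t => simp [List.length_cons]

-- ===== VERDICT (by name: the statement is the Claim_ definition above) =====
theorem filter_verses_py_spec : Claim_equal_filter_verses_py := by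
  intro all_verses selected _
  unfold Spec_filter_verses_py filter_verses_py filter_verses_py_alt
  simp only []
  split
  · rfl
  · split
    · rfl
    · next h1 h2 =>
      refine Prod.ext rfl ?_
      refine pv_label_eq _ (PySem.List.sorted_sorted _ _) ?_
      intro hnil
      exact h2 (by simp [hnil])
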